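-- pv_equiv track=rewrite | github.com/newaccbroken6-ops/guild-api | app.py | Encrypt_id_emote
-- ===== SOURCE A (Python) =====
-- def Encrypt_id_emote(uid):
--     result = []
--     while uid > 0:
--         byte = uid & 0x7F
--         uid >>= 7
--         if uid > 0:
--             byte |= 0x80
--         result.append(byte)
--     return bytes(result).hex()
-- ===== SOURCE B (Python) =====
-- def Encrypt_id_emote(uid):
--     if uid <= 0:
--         return ''
--     n = (uid.bit_length() + 6) // 7
--     out = bytearray(n)
--     for i in range(n):
--         b = (uid >> (7 * i)) & 0x7F
--         if i < n - 1:
--             b |= 0x80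
--         out[i] = b
--     return out.hex()
-- ===== Notes on version B (the rewrite author's own statement) =====
-- stated objective: alternative
-- what changed: B precomputes the group count from uid.bit_length() and extracts each seven-bit group by indexed shifts into a preallocated bytearray, instead of A's consume-while-mutate loop; uid is never mutated.
import Mathlib
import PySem

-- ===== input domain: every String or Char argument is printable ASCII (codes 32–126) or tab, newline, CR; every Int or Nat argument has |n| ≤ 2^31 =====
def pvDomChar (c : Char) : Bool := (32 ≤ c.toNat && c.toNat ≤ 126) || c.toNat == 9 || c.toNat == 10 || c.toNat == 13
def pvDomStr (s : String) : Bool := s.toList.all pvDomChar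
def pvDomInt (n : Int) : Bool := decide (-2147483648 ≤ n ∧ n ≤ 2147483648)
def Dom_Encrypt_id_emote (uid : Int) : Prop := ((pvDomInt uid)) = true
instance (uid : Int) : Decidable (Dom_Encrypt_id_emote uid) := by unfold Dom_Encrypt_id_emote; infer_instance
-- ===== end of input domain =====

-- B builds the varint bytes by indexed 7-bit extraction from a precomputed group count
-- (bit_length based), instead of A's consume-while-mutate loop; same value everywhere (alternative decomposition).

-- shared helper: Python's bytes(...).hex() / bytearray.hex() formatting (lowercase, two digits per byte)
def hexDigit (n : Nat) : Char := if n < 10 then Char.ofNat (48 + n) else Char.ofNat (87 + n)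
def hexByte (b : Int) : String := String.ofList [hexDigit (b.toNat / 16), hexDigit (b.toNat % 16)]
def bytesHex (l : List Int) : String := String.join (l.map hexByte)

-- ===== PORT A =====
-- termination helper for the while loop: uid >>= 7 strictly shrinks a positive uid
theorem shiftRight7_toNat_lt (uid : Int) (h : 0 < uid) : (uid >>> (7 : Nat)).toNat < uid.toNat := by
  rw [Int.shiftRight_eq_div_pow]; omega

-- the while loop of A: collects the byte list in order
def encA (uid : Int) : List Int :=
  if h : 0 < uid then
    let byte := PySem.Int.band uid 127
    let uid' := uid >>> (7 : Nat)
    let byte := if 0 < uid' then PySem.Int.bor byte 128 else byte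
    byte :: encA uid'
  else []
termination_by uid.toNat
decreasing_by exact shiftRight7_toNat_lt uid h

def Encrypt_id_emote (uid : Int) : String := bytesHex (encA uid)

-- ===== PORT B =====
def Encrypt_id_emote_alt (uid : Int) : String :=
  if uid ≤ 0 then "" else
    let n := (PySem.Int.bitLength uid + 6) / 7
    bytesHex ((List.range n).map (fun (i : Nat) =>
      let b := PySem.Int.band (uid >>> (7 * i : Nat)) 127
      if i < n - 1 then PySem.Int.bor b 128 else b))

-- ===== PRECONDITION & SPEC =====
def Spec_Encrypt_id_emote (uid : Int) (out : String) : Prop := out = Encrypt_id_emote_alt uid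
instance (uid : Int) (out : String) : Decidable (Spec_Encrypt_id_emote uid out) := by unfold Spec_Encrypt_id_emote; infer_instance

-- ===== CLAIM (what is proved, stated in full; the proofs are below) =====
def Claim_equal_Encrypt_id_emote : Prop := ∀ (uid : Int), Dom_Encrypt_id_emote uid → Spec_Encrypt_id_emote uid (Encrypt_id_emote uid)

-- ===== LEMMAS AND PROOFS =====

-- the per-index byte B produces, abbreviated for the proofs
def gB (uid : Int) (n i : Nat) : Int :=
  let b := PySem.Int.band (uid >>> (7 * i : Nat)) 127
  if i < n - 1 then PySem.Int.bor b 128 else b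

theorem shiftRight_pos_iff (uid : Int) (h : 0 < uid) : (0 < uid >>> (7 : Nat)) ↔ 128 ≤ uid := by
  rw [Int.shiftRight_eq_div_pow]; omega

theorem bitLength_pos (uid : Int) (h : 0 < uid) : 1 ≤ PySem.Int.bitLength uid := by
  have h2 := PySem.Int.lt_two_pow_bitLength uid
  by_contra hc
  have hz : PySem.Int.bitLength uid = 0 := by omega
  rw [hz] at h2
  simp at h2
  omega

theorem bitLength_le_seven (uid : Int) (h : 0 < uid) (h2 : uid < 128) :
    PySem.Int.bitLength uid ≤ 7 := by
  have := PySem.Int.two_pow_bitLength_le uid (by omega)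
  by_contra hc
  have : (2:Nat) ^ 7 ≤ 2 ^ (PySem.Int.bitLength uid - 1) :=
    Nat.pow_le_pow_right (by norm_num) (by omega)
  omega

theorem bitLength_shift7 (uid : Int) (h : 128 ≤ uid) :
    PySem.Int.bitLength uid = PySem.Int.bitLength (uid >>> (7 : Nat)) + 7 := by
  have step : ∀ m : Int, 0 < m / 2 → PySem.Int.bitLength m = PySem.Int.bitLength (m / 2) + 1 := by
    intro m hm
    have hm0 : 0 < m := by omega
    rw [PySem.Int.bitLength_of_pos hm0]
    have : PySem.Int.floordiv m 2 = m / 2 := by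
      unfold PySem.Int.floordiv
      rw [Int.fdiv_eq_ediv]
      simp
    rw [this]
  rw [Int.shiftRight_eq_div_pow]
  have h1 : uid / (((2:Nat) ^ (7:Nat) : Nat) : Int) = uid / 2 / 2 / 2 / 2 / 2 / 2 / 2 := by
    push_cast
    omega
  rw [h1]
  rw [step uid (by omega), step (uid/2) (by omega), step (uid/2/2) (by omega),
      step (uid/2/2/2) (by omega), step (uid/2/2/2/2) (by omega),
      step (uid/2/2/2/2/2) (by omega), step (uid/2/2/2/2/2/2) (by omega)]

theorem encA_eq_gB (m : Nat) : ∀ uid : Int, uid.toNat = m → 0 < uid →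
    encA uid = (List.range ((PySem.Int.bitLength uid + 6) / 7)).map
      (gB uid ((PySem.Int.bitLength uid + 6) / 7)) := by
  induction m using Nat.strong_induction_on with
  | _ m ih =>
    intro uid hm h
    have hbl1 : 1 ≤ PySem.Int.bitLength uid := bitLength_pos uid h
    rw [encA]
    simp only [h, dif_pos]
    by_cases h128 : uid < 128
    · -- one group: uid >>> 7 = 0
      have hz : ¬ (0 < uid >>> (7 : Nat)) := by
        rw [shiftRight_pos_iff uid h]; omega
      have hn : (PySem.Int.bitLength uid + 6) / 7 = 1 := by
        have := bitLength_le_seven uid h h128; omega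
      rw [hn]
      simp only [hz, if_neg, not_false_iff, List.range_one, List.map_cons, List.map_nil]
      rw [encA]
      simp only [hz, dif_neg, not_false_iff]
      unfold gB
      simp
    · -- at least two groups
      have h128' : 128 ≤ uid := by omega
      have hp : 0 < uid >>> (7 : Nat) := (shiftRight_pos_iff uid h).mpr h128'
      have hbl : PySem.Int.bitLength uid = PySem.Int.bitLength (uid >>> (7 : Nat)) + 7 :=
        bitLength_shift7 uid h128'
      set u' := uid >>> (7 : Nat) with hu'
      have hbl1' : 1 ≤ PySem.Int.bitLength u' := bitLength_pos u' hp
      set n' := (PySem.Int.bitLength u' + 6) / 7 with hn'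
      have hn'1 : 1 ≤ n' := by omega
      have hn : (PySem.Int.bitLength uid + 6) / 7 = n' + 1 := by
        rw [hbl]; omega
      have ihs : encA u' = (List.range n').map (gB u' n') :=
        ih u'.toNat (by have := shiftRight7_toNat_lt uid h; omega) u' rfl hp
      rw [hn, ihs]
      rw [List.range_succ_eq_map]
      simp only [hp, if_pos, List.map_cons, List.map_map]
      congr 1
      · have hpos : (0:Nat) < n' + 1 - 1 := by omega
        simp only [gB, Nat.mul_zero, Int.shiftRight_zero]
        rw [if_pos hpos]
      · apply List.map_congr_left
        intro i hi
        have hi' : i < n' := List.mem_range.mp hi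
        unfold gB
        simp only [Function.comp_apply]
        have hsh : uid >>> (7 * (Nat.succ i)) = u' >>> (7 * i) := by
          rw [hu', ← Int.shiftRight_add]
          congr 1
          omega
        have hcond : (Nat.succ i < n' + 1 - 1) ↔ (i < n' - 1) := by omega
        simp only [hsh, hcond]

theorem Encrypt_id_emote_spec : Claim_equal_Encrypt_id_emote := by
  unfold Claim_equal_Encrypt_id_emote Spec_Encrypt_id_emote
  intro uid _
  unfold Encrypt_id_emote Encrypt_id_emote_alt
  by_cases h : uid ≤ 0
  · have hnp : ¬ 0 < uid := by omega
    rw [encA]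
    simp [h, hnp, bytesHex, String.join]
  · have hp : 0 < uid := by omega
    rw [if_neg h, encA_eq_gB uid.toNat uid rfl hp]
    unfold gB
    rfl
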